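-- pv_equiv track=rewrite | github.com/DuarteSJ/Projetos_FP_IST | Projeto_1_FP_2021-2022.py | decifrar_texto
-- ===== SOURCE A (Python) =====
-- def decifrar_texto(cifra, n):
--     """decifrar_texto; cad. caracteres x inteiro -> cad.caracteres
--     Esta função recebe uma cadeia de caracteres correspondente a uma cifra e
--     um número de segurança, que utiliza para descodificar essa cifra.
--     A cifra é retornada ao utilizador"""
--
--     n = n % 26
--     tuplo_alfabeto = ('a', 'b', 'c', 'd', 'e', 'f', 'g', 'h', 'i', 'j', 'k', 'l', 'm', 'n', 'o', 'p', 'q', 'r', 's', 't'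
--                       , 'u', 'v', 'w', 'x', 'y', 'z', 'a', 'b', 'c', 'd', 'e', 'f', 'g', 'h', 'i', 'j', 'k', 'l',
--                       'm', 'n', 'o', 'p', 'q', 'r', 's', 't', 'u', 'v', 'w', 'x', 'y', 'z')
--     for caracter in range(len(cifra)):
--         if caracter < len(cifra):
--             if cifra[caracter] == '-':
--                 cifra = cifra[:caracter] + ' ' + cifra[caracter + 1:]
--             elif cifra[caracter] in tuplo_alfabeto:
--                 posicao = tuplo_alfabeto.index(cifra[caracter])
--                 if caracter % 2 == 0:
--                     cifra = cifra[:caracter] + tuplo_alfabeto[posicao + n + 1] + cifra[caracter + 1:]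
--                 else:
--                     cifra = cifra[:caracter] + tuplo_alfabeto[posicao + n - 1] + cifra[caracter + 1:]
--         else:
--             if cifra[caracter] in tuplo_alfabeto:
--                 posicao = tuplo_alfabeto.index(cifra[caracter])
--                 if caracter % 2 == 0:
--                     cifra = cifra[:caracter] + tuplo_alfabeto[posicao + n + 1]
--                 else:
--                     cifra = cifra[:caracter] + tuplo_alfabeto[posicao + n - 1]
--     return cifra
-- ===== SOURCE B (Python) =====
-- def decifrar_texto(cifra, n):
--     """Same decoding via two translation tables applied to the even/odd slices, then interleaved."""
--     alphabet = 'abcdefghijklmnopqrstuvwxyz'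
--     even = str.maketrans(alphabet + '-',
--                          ''.join(alphabet[(i + n + 1) % 26] for i in range(26)) + ' ')
--     odd = str.maketrans(alphabet + '-',
--                         ''.join(alphabet[(i + n - 1) % 26] for i in range(26)) + ' ')
--     e = cifra[0::2].translate(even)
--     o = cifra[1::2].translate(odd)
--     out = []
--     for a, b in zip(e, o):
--         out.append(a)
--         out.append(b)
--     if len(e) > len(o):
--         out.append(e[-1])
--     return ''.join(out)
-- ===== Notes on version B (the rewrite author's own statement) =====
-- stated objective: faster
-- what changed: Instead of rebuilding the whole string around each index with slicing and a linear tuple.index scan per character, B splits the cipher into its even and odd slices, applies two precomputed str.maketrans translation tables, and interleaves the results.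
import Mathlib
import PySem

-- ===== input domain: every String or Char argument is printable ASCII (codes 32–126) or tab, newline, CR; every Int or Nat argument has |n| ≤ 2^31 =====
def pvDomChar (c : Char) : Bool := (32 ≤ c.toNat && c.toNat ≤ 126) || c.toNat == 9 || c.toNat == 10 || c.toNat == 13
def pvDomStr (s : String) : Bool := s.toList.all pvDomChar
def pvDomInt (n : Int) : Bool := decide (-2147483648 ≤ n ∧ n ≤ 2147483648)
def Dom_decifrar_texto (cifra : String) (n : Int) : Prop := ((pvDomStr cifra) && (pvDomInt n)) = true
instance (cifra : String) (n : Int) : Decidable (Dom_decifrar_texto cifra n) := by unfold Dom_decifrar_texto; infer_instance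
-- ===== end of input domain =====

-- B replaces A's per-character string rebuilding (slice + tuple.index scan per position) by two
-- precomputed translation tables applied to the even/odd slices, interleaved back (objective: faster).

-- ===== PORT A =====
-- the 52-entry doubled alphabet tuple of A
def pvTuplo : List Char :=
  ['a','b','c','d','e','f','g','h','i','j','k','l','m','n','o','p','q','r','s','t',
   'u','v','w','x','y','z','a','b','c','d','e','f','g','h','i','j','k','l',
   'm','n','o','p','q','r','s','t','u','v','w','x','y','z']

-- one iteration of A's loop body (state = current cifra as char list, caracter = loop index)
def pvStepA (m : Int) (s : List Char) (caracter : Int) : List Char :=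
  if caracter < PySem.List.len s then
    match PySem.List.pyGet? s caracter with
    | none => s  -- cifra[caracter]: IndexError (unreachable: caracter < len)
    | some c =>
      if c = '-' then
        PySem.List.slice s none (some caracter) ++ ' ' :: PySem.List.slice s (some (caracter + 1)) none
      else if pvTuplo.contains c then
        match PySem.List.index? pvTuplo c with
        | none => s  -- unreachable: c is in the tuple
        | some posicao =>
          if PySem.Int.mod caracter 2 = 0 then
            match PySem.List.pyGet? pvTuplo ((posicao : Int) + m + 1) with
            | none => s  -- IndexError (unreachable)
            | some r => PySem.List.slice s none (some caracter) ++ r :: PySem.List.slice s (some (caracter + 1)) none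
          else
            match PySem.List.pyGet? pvTuplo ((posicao : Int) + m - 1) with
            | none => s  -- IndexError (unreachable; posicao+m-1 = -1 wraps to the last 'z')
            | some r => PySem.List.slice s none (some caracter) ++ r :: PySem.List.slice s (some (caracter + 1)) none
      else s
  else
    -- A's dead 'else' branch (caracter ≥ len never happens: the length is constant);
    -- Python would raise IndexError on cifra[caracter], i.e. pyGet? = none, leaving s
    match PySem.List.pyGet? s caracter with
    | none => s
    | some c =>
      if pvTuplo.contains c then
        match PySem.List.index? pvTuplo c with
        | none => s
        | some posicao =>
          if PySem.Int.mod caracter 2 = 0 then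
            match PySem.List.pyGet? pvTuplo ((posicao : Int) + m + 1) with
            | none => s
            | some r => PySem.List.slice s none (some caracter) ++ [r]
          else
            match PySem.List.pyGet? pvTuplo ((posicao : Int) + m - 1) with
            | none => s
            | some r => PySem.List.slice s none (some caracter) ++ [r]
      else s

def decifrar_texto (cifra : String) (n : Int) : String :=
  let m := PySem.Int.mod n 26
  String.ofList
    ((PySem.List.pyRange 0 (PySem.List.len cifra.toList) 1).foldl (pvStepA m) cifra.toList)

-- ===== PORT B =====
def pvAlphabet : List Char :=
  ['a','b','c','d','e','f','g','h','i','j','k','l','m','n','o','p','q','r','s','t','u','v','w','x','y','z']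

-- str.maketrans table for even positions: letter i ↦ alphabet[(i+n+1)%26], '-' ↦ ' '
def pvTabelaPar (n : Int) : List (Char × Char) :=
  pvAlphabet.zip ((PySem.List.pyRange 0 26 1).map
    (fun i => PySem.List.pyGetD pvAlphabet (PySem.Int.mod (i + n + 1) 26) 'a')) ++ [('-', ' ')]

-- str.maketrans table for odd positions: letter i ↦ alphabet[(i+n-1)%26], '-' ↦ ' '
def pvTabelaImpar (n : Int) : List (Char × Char) :=
  pvAlphabet.zip ((PySem.List.pyRange 0 26 1).map
    (fun i => PySem.List.pyGetD pvAlphabet (PySem.Int.mod (i + n - 1) 26) 'a')) ++ [('-', ' ')]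

-- str.translate: map each char through the table, unchanged if absent
def pvTranslate (tab : List (Char × Char)) (s : List Char) : List Char :=
  s.map (fun c => (List.lookup c tab).getD c)

def decifrar_texto_alt (cifra : String) (n : Int) : String :=
  let e := pvTranslate (pvTabelaPar n) ((PySem.List.slice? cifra.toList none none 2).getD [])
  let o := pvTranslate (pvTabelaImpar n) ((PySem.List.slice? cifra.toList (some 1) none 2).getD [])
  let out := (e.zip o).foldl (fun acc p => acc ++ [p.1, p.2]) ([] : List Char)
  let out2 :=
    if o.length < e.length then
      match PySem.List.pyGet? e (-1) with
      | some c => out ++ [c]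
      | none => out
    else out
  String.ofList out2

-- ===== PRECONDITION & SPEC =====
def Spec_decifrar_texto (cifra : String) (n : Int) (out : String) : Prop := out = decifrar_texto_alt cifra n
instance (cifra : String) (n : Int) (out : String) : Decidable (Spec_decifrar_texto cifra n out) := by unfold Spec_decifrar_texto; infer_instance

-- ===== CLAIM (what is proved, stated in full; the proofs are below) =====
def Claim_equal_decifrar_texto : Prop := ∀ (cifra : String) (n : Int), Dom_decifrar_texto cifra n → Spec_decifrar_texto cifra n (decifrar_texto cifra n)

-- ===== LEMMAS AND PROOFS =====



-- the common per-character semantics: '-' becomes ' ', the letter at alphabet position p becomes alphabet[(p+n±1) % 26]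
def pvDecode (n : Int) (odd : Bool) (c : Char) : Char :=
  if c = '-' then ' '
  else
    match PySem.List.index? pvAlphabet c with
    | none => c
    | some p => PySem.List.pyGetD pvAlphabet (PySem.Int.mod ((p : Int) + n + (cond odd (-1) 1)) 26) 'a'

-- decode a list, alternating the parity flag
def pvMapAlt (n : Int) : Bool → List Char → List Char
  | _, [] => []
  | b, c :: t => pvDecode n b c :: pvMapAlt n (!b) t

def pvEvens {α : Type} : List α → List α
  | [] => []
  | [c] => [c]
  | c :: _ :: t => c :: pvEvens t

def pvOdds {α : Type} : List α → List α
  | [] => []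
  | [_] => []
  | _ :: c :: t => c :: pvOdds t

lemma length_pvMapAlt (n : Int) (b : Bool) (l : List Char) : (pvMapAlt n b l).length = l.length := by
  induction l generalizing b with
  | nil => rfl
  | cons c t ih => simp [pvMapAlt, ih]

lemma pvMapAlt_snoc (n : Int) (b : Bool) (l : List Char) (c : Char) :
    pvMapAlt n b (l ++ [c]) = pvMapAlt n b l ++ [pvDecode n (b ^^ decide (l.length % 2 = 1)) c] := by
  induction l generalizing b with
  | nil => simp [pvMapAlt]
  | cons x t ih =>
    simp only [List.cons_append, pvMapAlt, ih (!b), List.length_cons]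
    have hf : ((!b) ^^ decide (t.length % 2 = 1)) = (b ^^ decide ((t.length + 1) % 2 = 1)) := by
      rcases Nat.mod_two_eq_zero_or_one t.length with h | h <;>
        cases b <;> simp [h, Nat.add_mod, show ¬ ((0:Nat) = 1) by omega]
    rw [hf]
    rfl

-- ---- character-level facts ----

lemma mem_alpha_ne_dash : ∀ c ∈ pvAlphabet, c ≠ '-' := by
  intro c hc
  simp only [pvAlphabet, List.mem_cons, List.not_mem_nil, or_false] at hc
  rcases hc with rfl|rfl|rfl|rfl|rfl|rfl|rfl|rfl|rfl|rfl|rfl|rfl|rfl|rfl|rfl|rfl|rfl|rfl|rfl|rfl|rfl|rfl|rfl|rfl|rfl|rfl <;> decide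

lemma tuplo_eq : pvTuplo = pvAlphabet ++ pvAlphabet := by rfl

lemma contains_tuplo_iff (c : Char) : pvTuplo.contains c = true ↔ c ∈ pvAlphabet := by
  rw [tuplo_eq]; simp

lemma index_tuplo (c : Char) (hc : c ∈ pvAlphabet) :
    PySem.List.index? pvTuplo c = PySem.List.index? pvAlphabet c := by
  rw [tuplo_eq]; exact PySem.List.index?_append_of_mem _ hc

lemma index_alpha_lt (c : Char) (p : Nat) (h : PySem.List.index? pvAlphabet c = some p) : p < 26 := by
  obtain ⟨hk, -, -⟩ := PySem.List.getElem_of_index?_eq_some h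
  simpa [pvAlphabet] using hk

set_option maxRecDepth 8192 in
lemma tuplo_get : ∀ j : Nat, j < 52 → pvTuplo[j]? = some (pvAlphabet.getD (j % 26) 'a') := by decide

lemma pyGetD_alpha_mod (x : Int) :
    PySem.List.pyGetD pvAlphabet (PySem.Int.mod x 26) 'a' = pvAlphabet.getD ((x % 26).toNat) 'a' := by
  rw [PySem.Int.mod_eq_emod_of_pos (by norm_num)]
  have h0 : (0:Int) ≤ x % 26 := Int.emod_nonneg x (by norm_num)
  have h1 : x % 26 < 26 := Int.emod_lt_of_pos x (by norm_num)
  rw [PySem.List.pyGetD_eq_getElem _ _ h0 (by simp [pvAlphabet]; omega)]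
  rw [List.getD_eq_getElem _ _ (by simp [pvAlphabet]; omega)]

-- A's even-position replacement equals pvDecode n false c
lemma stepA_even_char (n m : Int) (hm : m = n % 26) (c : Char) (p : Nat)
    (hidx : PySem.List.index? pvAlphabet c = some p) :
    PySem.List.pyGet? pvTuplo ((p : Int) + m + 1) = some (pvDecode n false c) := by
  have hp : p < 26 := index_alpha_lt c p hidx
  have hcd : c ≠ '-' :=
    mem_alpha_ne_dash c ((PySem.List.index?_isSome_iff _ _).mp (by rw [hidx]; rfl))
  have hj : ((p : Int) + m + 1) = ((((p : Int) + m + 1).toNat : Nat) : Int) := by omega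
  rw [hj, PySem.List.pyGet?_natCast, tuplo_get _ (by omega)]
  simp only [pvDecode, if_neg hcd, hidx, Bool.cond_false, pyGetD_alpha_mod]
  have : ((p : Int) + m + 1).toNat % 26 = (((p : Int) + n + 1) % 26).toNat := by omega
  rw [this]

-- A's odd-position replacement equals pvDecode n true c (posicao+m-1 = -1 wraps to the last 'z')
lemma stepA_odd_char (n m : Int) (hm : m = n % 26) (c : Char) (p : Nat)
    (hidx : PySem.List.index? pvAlphabet c = some p) :
    PySem.List.pyGet? pvTuplo ((p : Int) + m - 1) = some (pvDecode n true c) := by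
  have hp : p < 26 := index_alpha_lt c p hidx
  have hcd : c ≠ '-' :=
    mem_alpha_ne_dash c ((PySem.List.index?_isSome_iff _ _).mp (by rw [hidx]; rfl))
  simp only [pvDecode, if_neg hcd, hidx, Bool.cond_true, pyGetD_alpha_mod]
  by_cases hneg : (0:Int) ≤ (p : Int) + m - 1
  · have hj : ((p : Int) + m - 1) = ((((p : Int) + m - 1).toNat : Nat) : Int) := by omega
    rw [hj, PySem.List.pyGet?_natCast, tuplo_get _ (by omega)]
    have : ((p : Int) + m - 1).toNat % 26 = (((p : Int) + n + -1) % 26).toNat := by omega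
    rw [this]
  · have h1 : ((p : Int) + m - 1) = -1 := by omega
    rw [h1, PySem.List.pyGet?_neg_one]
    have h2 : (((p : Int) + n + -1) % 26).toNat = 25 := by omega
    rw [h2]
    decide

-- ---- the A-side loop invariant ----

lemma stepA_spec (n : Int) (l : List Char) (k : Nat) (hk : k < l.length) :
    pvStepA (PySem.Int.mod n 26) (pvMapAlt n false (l.take k) ++ l.drop k) (k : Int)
      = pvMapAlt n false (l.take (k + 1)) ++ l.drop (k + 1) := by
  set s := pvMapAlt n false (l.take k) ++ l.drop k with hs
  have hlenA : (pvMapAlt n false (l.take k)).length = k := by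
    rw [length_pvMapAlt]; exact List.length_take_of_le (le_of_lt hk)
  have hsl : s.length = l.length := by
    simp [hs, hlenA]; omega
  have hget : PySem.List.pyGet? s (k : Int) = some l[k] := by
    rw [PySem.List.pyGet?_natCast]
    rw [List.getElem?_append_right (by omega), hlenA]
    simp [List.getElem?_drop]
  have hslice1 : PySem.List.slice s none (some (k : Int)) = pvMapAlt n false (l.take k) := by
    rw [PySem.List.slice_to_natCast]
    exact List.take_left' hlenA
  have hslice2 : PySem.List.slice s (some ((k : Int) + 1)) none = l.drop (k + 1) := by
    have hc : ((k : Int) + 1) = (((k + 1 : Nat) : Nat) : Int) := by push_cast; ring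
    rw [hc, PySem.List.slice_from_natCast]
    have h1 : List.drop (k + 1) s = List.drop 1 (List.drop k s) := by
      rw [List.drop_drop]
    have h2 : List.drop k s = l.drop k := by
      rw [hs]; exact List.drop_left' hlenA
    rw [h1, h2, List.drop_drop]
  have htake : pvMapAlt n false (l.take (k + 1))
      = pvMapAlt n false (l.take k) ++ [pvDecode n (decide (k % 2 = 1)) l[k]] := by
    rw [List.take_add_one, List.getElem?_eq_getElem hk]
    simp only [Option.toList_some]
    rw [pvMapAlt_snoc, Bool.false_xor, List.length_take_of_le (le_of_lt hk)]
  have hdrop : l.drop k = l[k] :: l.drop (k + 1) := List.drop_eq_getElem_cons hk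
  have hcond : (k : Int) < PySem.List.len s := by
    rw [PySem.List.len_eq, hsl]; exact_mod_cast hk
  have hpar : PySem.Int.mod (k : Int) 2 = ((k % 2 : Nat) : Int) := by
    exact_mod_cast PySem.Int.mod_natCast k 2
  rw [pvStepA, if_pos hcond, hget]
  dsimp only
  by_cases hdash : l[k] = '-'
  · rw [if_pos hdash, hslice1, hslice2, htake, hdash]
    have : pvDecode n (decide (k % 2 = 1)) '-' = ' ' := by simp [pvDecode]
    rw [this]
    simp
  · rw [if_neg hdash]
    by_cases hmem : l[k] ∈ pvAlphabet
    · rw [if_pos ((contains_tuplo_iff _).mpr hmem), index_tuplo _ hmem]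
      obtain ⟨p, hidx⟩ := Option.isSome_iff_exists.mp ((PySem.List.index?_isSome_iff _ _).mpr hmem)
      rw [hidx]
      dsimp only
      by_cases hpar0 : k % 2 = 0
      · rw [if_pos (by rw [hpar, hpar0]; rfl)]
        rw [stepA_even_char n _ (PySem.Int.mod_eq_emod_of_pos (by norm_num)) _ p hidx]
        dsimp only
        rw [hslice1, hslice2, htake]
        have : decide (k % 2 = 1) = false := by simp [hpar0]
        rw [this]
        simp
      · rw [if_neg (by rw [hpar]; intro h; apply hpar0; exact_mod_cast h)]
        rw [stepA_odd_char n _ (PySem.Int.mod_eq_emod_of_pos (by norm_num)) _ p hidx]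
        dsimp only
        rw [hslice1, hslice2, htake]
        have : decide (k % 2 = 1) = true := by simp; omega
        rw [this]
        simp
    · rw [if_neg (by simp [tuplo_eq, hmem])]
      rw [htake]
      have hnone : PySem.List.index? pvAlphabet l[k] = none :=
        (PySem.List.index?_eq_none_iff _ _).mpr hmem
      have : pvDecode n (decide (k % 2 = 1)) l[k] = l[k] := by
        unfold pvDecode
        rw [if_neg hdash, hnone]
      rw [this, hs, hdrop]
      simp

lemma foldlA (n : Int) (l : List Char) :
    ∀ k : Nat, k ≤ l.length →
      (PySem.List.pyRange 0 (k : Int)).foldl (pvStepA (PySem.Int.mod n 26)) l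
        = pvMapAlt n false (l.take k) ++ l.drop k := by
  intro k
  induction k with
  | zero => intro _; simp [PySem.List.pyRange_one_eq_nil le_rfl, pvMapAlt]
  | succ k ih =>
    intro hk1
    have hcast : ((k + 1 : Nat) : Int) = (k : Int) + 1 := by push_cast; ring
    rw [hcast, PySem.List.pyRange_one_succ_right (by exact_mod_cast Nat.zero_le k), List.foldl_append]
    rw [ih (by omega)]
    exact stepA_spec n l k (by omega)

lemma A_eq (cifra : String) (n : Int) :
    decifrar_texto cifra n = String.ofList (pvMapAlt n false cifra.toList) := by
  unfold decifrar_texto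
  dsimp only
  rw [PySem.List.len_eq, foldlA n cifra.toList cifra.toList.length le_rfl,
      List.take_length, List.drop_length]
  simp

-- ---- the B side ----

lemma filterMap_evens {α : Type} : ∀ l : List α,
    (List.range ((l.length + 1) / 2)).filterMap (fun k => l[2 * k]?) = pvEvens l
  | [] => by simp [pvEvens]
  | [c] => by simp [pvEvens]
  | a :: b :: t => by
    have hn : ((a :: b :: t).length + 1) / 2 = ((t.length + 1) / 2) + 1 := by
      simp only [List.length_cons]; omega
    rw [hn, List.range_succ_eq_map, List.filterMap_cons]
    simp only [Nat.mul_zero, List.getElem?_cons_zero, List.filterMap_map]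
    have hfun : ((fun k => (a :: b :: t)[2 * k]?) ∘ Nat.succ) = (fun k : Nat => t[2 * k]?) := by
      funext k
      simp [show 2 * (k + 1) = 2 * k + 1 + 1 by ring, List.getElem?_cons_succ]
    rw [hfun, filterMap_evens t]
    rfl

lemma filterMap_odds {α : Type} : ∀ l : List α,
    (List.range (l.length / 2)).filterMap (fun k => l[2 * k + 1]?) = pvOdds l
  | [] => by simp [pvOdds]
  | [c] => by simp [pvOdds]
  | a :: b :: t => by
    have hn : (a :: b :: t).length / 2 = (t.length / 2) + 1 := by
      simp only [List.length_cons]; omega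
    rw [hn, List.range_succ_eq_map, List.filterMap_cons]
    simp only [Nat.mul_zero, Nat.zero_add, List.getElem?_cons_succ, List.getElem?_cons_zero,
      List.filterMap_map]
    have hfun : ((fun x => (b :: t)[2 * x]?) ∘ Nat.succ) = (fun k : Nat => t[2 * k + 1]?) := by
      funext k
      simp [show 2 * (k + 1) = 2 * k + 1 + 1 by ring, List.getElem?_cons_succ]
    rw [hfun, filterMap_odds t]
    rfl

lemma slice?_evens {α : Type} (l : List α) :
    PySem.List.slice? l none none 2 = some (pvEvens l) := by
  simp only [PySem.List.slice?, PySem.List.sliceIndices]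
  norm_num
  have hf : (fun x : Nat => l[(2 * (x:Int)).toNat]?) = (fun k : Nat => l[2 * k]?) := by
    funext k; rw [show ((2 * (k:Int)).toNat) = 2 * k by omega]
  have hc : (if 0 < l.length then (((l.length:Int) + 2 - 1) / 2).toNat else 0)
      = (l.length + 1) / 2 := by
    split <;> omega
  rw [hf, hc, filterMap_evens]

lemma slice?_odds {α : Type} (l : List α) :
    PySem.List.slice? l (some 1) none 2 = some (pvOdds l) := by
  simp only [PySem.List.slice?, PySem.List.sliceIndices]
  norm_num
  rcases l with - | ⟨a, t⟩
  · simp [pvOdds]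
  · have hf : (fun x : Nat => (a :: t)[(min 1 (((a :: t).length:Nat):Int) + 2 * (x:Int)).toNat]?)
        = (fun k : Nat => (a :: t)[2 * k + 1]?) := by
      funext k
      rw [show ((min 1 (((a :: t).length:Nat):Int) + 2 * (k:Int)).toNat) = 2 * k + 1 by
        simp; omega]
    have hc : (if 1 < (a :: t).length then
          ((((a :: t).length:Int) - min 1 (((a :: t).length:Nat):Int) + 2 - 1) / 2).toNat else 0)
        = (a :: t).length / 2 := by
      simp; split <;> omega
    rw [hf, hc, filterMap_odds]

-- lookup on a zip table whose keys contain c at index p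
lemma lookup_zip_of_index {β : Type} (c : Char) :
    ∀ (ks : List Char) (vs : List β) (rest : List (Char × β)) (p : Nat),
      PySem.List.index? ks c = some p → ks.length ≤ vs.length →
      List.lookup c (ks.zip vs ++ rest) = vs[p]?
  | [], vs, rest, p => by intro h _; rw [(PySem.List.index?_eq_none_iff _ _).mpr (by simp)] at h; cases h
  | k :: ks, [], rest, p => by intro _ h; simp at h
  | k :: ks, v :: vt, rest, p => by
    intro hidx hlen
    by_cases hkc : k = c
    · subst hkc
      rw [PySem.List.index?_cons_self] at hidx
      cases hidx
      simp
    · rw [PySem.List.index?_cons_of_ne _ hkc] at hidx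
      obtain ⟨q, hq, rfl⟩ := Option.map_eq_some_iff.mp hidx
      have hck : (c == k) = false := by simp [Ne.symm hkc]
      rw [List.zip_cons_cons, List.cons_append, List.lookup, hck]
      rw [lookup_zip_of_index c ks vt rest q hq (by simpa using hlen)]
      simp

lemma lookup_zip_of_not_mem {β : Type} (c : Char) :
    ∀ (ks : List Char) (vs : List β) (rest : List (Char × β)), c ∉ ks →
      List.lookup c (ks.zip vs ++ rest) = List.lookup c rest
  | [], vs, rest => by intro _; simp
  | k :: ks, [], rest => by intro _; simp
  | k :: ks, v :: vt, rest => by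
    intro hmem
    have hck : (c == k) = false := by
      simp only [beq_eq_false_iff_ne, ne_eq]
      intro h
      exact hmem (h ▸ List.mem_cons_self)
    rw [List.zip_cons_cons, List.cons_append, List.lookup, hck]
    exact lookup_zip_of_not_mem c ks vt rest (fun h => hmem (List.mem_cons_of_mem _ h))

lemma len_table_vals {β : Type} (f : Int → β) :
    ((PySem.List.pyRange 0 26).map f).length = 26 := by
  rw [List.length_map, PySem.List.length_pyRange_one]
  rfl

lemma translate_par (n : Int) (c : Char) :
    (List.lookup c (pvTabelaPar n)).getD c = pvDecode n false c := by
  by_cases hmem : c ∈ pvAlphabet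
  · obtain ⟨p, hidx⟩ := Option.isSome_iff_exists.mp ((PySem.List.index?_isSome_iff _ _).mpr hmem)
    have hp : p < 26 := index_alpha_lt c p hidx
    have hcd : c ≠ '-' := mem_alpha_ne_dash c hmem
    have hv : ((PySem.List.pyRange 0 26).map
        (fun i => PySem.List.pyGetD pvAlphabet (PySem.Int.mod (i + n + 1) 26) 'a'))[p]? =
        some (PySem.List.pyGetD pvAlphabet (PySem.Int.mod ((p : Int) + n + 1) 26) 'a') := by
      exact_mod_cast PySem.List.getElem?_map_pyRange_zero
        (fun i => PySem.List.pyGetD pvAlphabet (PySem.Int.mod (i + n + 1) 26) 'a') 26 p hp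
    rw [pvTabelaPar, lookup_zip_of_index c pvAlphabet _ _ p hidx (by rw [len_table_vals]; decide), hv]
    simp only [Option.getD_some]
    unfold pvDecode
    rw [if_neg hcd, hidx]
    rfl
  · by_cases hc : c = '-'
    · subst hc
      rw [pvTabelaPar, lookup_zip_of_not_mem _ _ _ _ hmem]
      simp [List.lookup, pvDecode]
    · have hnone : PySem.List.index? pvAlphabet c = none :=
        (PySem.List.index?_eq_none_iff _ _).mpr hmem
      have hcb : (c == '-') = false := by simp [hc]
      rw [pvTabelaPar, lookup_zip_of_not_mem _ _ _ _ hmem]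
      unfold pvDecode
      rw [List.lookup, hcb, if_neg hc, hnone]
      rfl

lemma translate_impar (n : Int) (c : Char) :
    (List.lookup c (pvTabelaImpar n)).getD c = pvDecode n true c := by
  by_cases hmem : c ∈ pvAlphabet
  · obtain ⟨p, hidx⟩ := Option.isSome_iff_exists.mp ((PySem.List.index?_isSome_iff _ _).mpr hmem)
    have hp : p < 26 := index_alpha_lt c p hidx
    have hcd : c ≠ '-' := mem_alpha_ne_dash c hmem
    have hv : ((PySem.List.pyRange 0 26).map
        (fun i => PySem.List.pyGetD pvAlphabet (PySem.Int.mod (i + n - 1) 26) 'a'))[p]? =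
        some (PySem.List.pyGetD pvAlphabet (PySem.Int.mod ((p : Int) + n - 1) 26) 'a') := by
      exact_mod_cast PySem.List.getElem?_map_pyRange_zero
        (fun i => PySem.List.pyGetD pvAlphabet (PySem.Int.mod (i + n - 1) 26) 'a') 26 p hp
    rw [pvTabelaImpar, lookup_zip_of_index c pvAlphabet _ _ p hidx (by rw [len_table_vals]; decide), hv]
    simp only [Option.getD_some]
    unfold pvDecode
    rw [if_neg hcd, hidx]
    have hsub : ((p : Int) + n - 1) = (p : Int) + n + -1 := by ring
    rw [hsub]
    rfl
  · by_cases hc : c = '-'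
    · subst hc
      rw [pvTabelaImpar, lookup_zip_of_not_mem _ _ _ _ hmem]
      simp [List.lookup, pvDecode]
    · have hnone : PySem.List.index? pvAlphabet c = none :=
        (PySem.List.index?_eq_none_iff _ _).mpr hmem
      have hcb : (c == '-') = false := by simp [hc]
      rw [pvTabelaImpar, lookup_zip_of_not_mem _ _ _ _ hmem]
      unfold pvDecode
      rw [List.lookup, hcb, if_neg hc, hnone]
      rfl

lemma translate_map_par (n : Int) (xs : List Char) :
    pvTranslate (pvTabelaPar n) xs = xs.map (pvDecode n false) := by
  unfold pvTranslate
  exact List.map_congr_left (fun c _ => translate_par n c)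

lemma translate_map_impar (n : Int) (xs : List Char) :
    pvTranslate (pvTabelaImpar n) xs = xs.map (pvDecode n true) := by
  unfold pvTranslate
  exact List.map_congr_left (fun c _ => translate_impar n c)

-- B's zip-fold-plus-leftover, as one function
def pvInterleave (e o : List Char) : List Char :=
  (e.zip o).flatMap (fun p => [p.1, p.2]) ++
    (if o.length < e.length then
       match PySem.List.pyGet? e (-1) with
       | some c => [c]
       | none => []
     else [])

lemma interleave_maps (n : Int) : ∀ (l : List Char) (b : Bool),
    pvInterleave ((pvEvens l).map (pvDecode n b)) ((pvOdds l).map (pvDecode n (!b)))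
      = pvMapAlt n b l
  | [], b => by simp [pvEvens, pvOdds, pvInterleave, pvMapAlt]
  | [c], b => by
    simp [pvEvens, pvOdds, pvInterleave, pvMapAlt, PySem.List.pyGet?_neg_one]
  | c1 :: c2 :: t, b => by
    have ih := interleave_maps n t b
    simp only [pvEvens, pvOdds, List.map_cons, pvMapAlt, Bool.not_not]
    rw [← ih]
    set e := (pvEvens t).map (pvDecode n b) with he
    set o := (pvOdds t).map (pvDecode n (!b)) with ho
    show pvInterleave (pvDecode n b c1 :: e) (pvDecode n (!b) c2 :: o)
        = pvDecode n b c1 :: pvDecode n (!b) c2 :: pvInterleave e o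
    unfold pvInterleave
    simp only [List.zip_cons_cons, List.flatMap_cons, List.length_cons]
    simp only [Nat.add_lt_add_iff_right]
    by_cases hlt : o.length < e.length
    · have hne : e ≠ [] := by intro h; rw [h] at hlt; simp at hlt
      rcases e with - | ⟨x, e'⟩
      · cases hne rfl
      · rw [if_pos hlt, if_pos hlt, PySem.List.pyGet?_neg_one, PySem.List.pyGet?_neg_one,
            List.getLast?_cons_cons]
        simp
    · rw [if_neg hlt, if_neg hlt]
      simp

lemma B_eq (cifra : String) (n : Int) :
    decifrar_texto_alt cifra n = String.ofList (pvMapAlt n false cifra.toList) := by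
  unfold decifrar_texto_alt
  rw [slice?_evens, slice?_odds]
  simp only [Option.getD_some]
  rw [translate_map_par, translate_map_impar]
  rw [PySem.List.foldl_append_eq_flatMap (fun p : Char × Char => [p.1, p.2]) _ []]
  rw [← interleave_maps n cifra.toList false]
  simp only [Bool.not_false]
  unfold pvInterleave
  set e := (pvEvens cifra.toList).map (pvDecode n false)
  set o := (pvOdds cifra.toList).map (pvDecode n true)
  by_cases hlt : o.length < e.length
  · rw [if_pos hlt, if_pos hlt]
    cases h : PySem.List.pyGet? e (-1) <;> simp
  · rw [if_neg hlt, if_neg hlt]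
    simp

-- ===== VERDICT (by name: the statement is the Claim_ definition above) =====
theorem decifrar_texto_spec : Claim_equal_decifrar_texto := by
  intro cifra n _
  unfold Spec_decifrar_texto
  rw [A_eq, B_eq]
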